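-- pv_equiv track=rewrite | github.com/SamHusbands21/tennis-predictor | src/pipeline/live.py | _match_betfair_name
-- ===== SOURCE A (Python) =====
-- def _match_betfair_name(
--     betfair_name: str,
--     name_to_id: dict[str, int],
-- ) -> int | None:
--     """
--     Resolve a Betfair runner name to a Sackmann player_id.
--
--     Attempts (in order):
--       1. Exact match
--       2. "F. LastName" → match by first initial + last name
--       3. Last name only (fallback; risky for common surnames)
--     """
--     name = betfair_name.strip()
--
--     # 1. Exact
--     if name in name_to_id:
--         return name_to_id[name]
--
--     # 2. Abbreviated: "N. Djokovic"
--     parts = name.split(". ", 1)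
--     if len(parts) == 2:
--         first_initial = parts[0].strip().upper()
--         last_name     = parts[1].strip().lower()
--         candidates = [
--             pid for n, pid in name_to_id.items()
--             if len(n.split()) >= 2
--             and n.split()[-1].lower() == last_name
--             and n.split()[0][0].upper() == first_initial
--         ]
--         if len(candidates) == 1:
--             return candidates[0]
--         if len(candidates) > 1:
--             # Multiple candidates: prefer the one seen most recently
--             return candidates[0]
--
--     # 3. Last name only
--     last_name = name.split()[-1].lower()
--     candidates = [
--         pid for n, pid in name_to_id.items()
--         if n.split()[-1].lower() == last_name
--     ]
--     if len(candidates) == 1: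
--         return candidates[0]
--
--     return None
-- ===== SOURCE B (Python) =====
-- def _match_betfair_name(
--     betfair_name: str,
--     name_to_id: dict[str, int],
-- ) -> int | None:
--     """Resolve a Betfair runner name to a Sackmann player_id via a last-name index."""
--     name = betfair_name.strip()
--
--     # 1. Exact
--     if name in name_to_id:
--         return name_to_id[name]
--
--     # One pass: group entries by lowercased last name (insertion order kept).
--     buckets: dict[str, list[tuple[str, int]]] = {}
--     for n, pid in name_to_id.items():
--         words = n.split()
--         if words:
--             buckets.setdefault(words[-1].lower(), []).append((n, pid))
--
--     # 2. Abbreviated: "N. Djokovic" — look only at the last-name bucket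
--     parts = name.split(". ", 1)
--     if len(parts) == 2:
--         first_initial = parts[0].strip().upper()
--         last_name = parts[1].strip().lower()
--         cands = [pid for n, pid in buckets.get(last_name, [])
--                  if len(n.split()) >= 2 and n.split()[0][0].upper() == first_initial]
--         if cands:
--             return cands[0]
--
--     # 3. Last name only: the bucket must be a singleton
--     bucket = buckets.get(name.split()[-1].lower(), [])
--     if len(bucket) == 1:
--         return bucket[0][1]
--
--     return None
-- ===== Notes on version B (the rewrite author's own statement) =====
-- stated objective: alternative
-- what changed: B makes one grouping pass over the dict building an insertion-ordered index from lowercased last name to its entries, so the abbreviated-name and last-name-only fallbacks each read a single bucket instead of re-scanning (and re-splitting) the whole dict; it trades A's per-attempt whole-dict comprehensions for one index build.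
-- outside the precondition, e.g. on _match_betfair_name('', {'': 5}): A returns 5, B returns 5; on _match_betfair_name('N. Bob', {' ': 1, 'Nick Bob': 2}): A returns 2, B returns 2
import Mathlib
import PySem

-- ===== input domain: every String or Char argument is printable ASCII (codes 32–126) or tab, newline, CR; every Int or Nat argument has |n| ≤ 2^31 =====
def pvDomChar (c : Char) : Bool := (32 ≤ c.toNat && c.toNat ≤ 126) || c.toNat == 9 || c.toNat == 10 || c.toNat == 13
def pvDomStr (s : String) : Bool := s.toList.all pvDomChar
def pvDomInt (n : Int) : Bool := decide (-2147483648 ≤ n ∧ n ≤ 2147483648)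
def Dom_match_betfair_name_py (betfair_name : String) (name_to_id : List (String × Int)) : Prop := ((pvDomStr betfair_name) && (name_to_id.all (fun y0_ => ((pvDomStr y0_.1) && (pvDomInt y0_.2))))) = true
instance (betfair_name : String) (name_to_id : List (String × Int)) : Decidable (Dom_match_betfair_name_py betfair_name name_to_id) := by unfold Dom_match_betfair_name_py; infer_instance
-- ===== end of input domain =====

-- B replaces A's two whole-dict comprehension scans by one grouping pass building a
-- last-name index, so each fallback reads a single bucket (objective: alternative).

-- shared subexpressions of both Pythons:
-- n.split()[-1].lower()  (empty-split keys are outside Pre_; the .getD "" default is never reached there)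
def pvLastLower (n : String) : String :=
  PySem.Str.lower ((PySem.List.pyGet? (PySem.Str.split₀ n) (-1)).getD "")

-- parts = name.split(". ", 1); the separator is nonempty so splitMax? never returns none
def pvParts (name : String) : List String :=
  (PySem.Str.splitMax? name ". " 1).getD []

-- n.split()[0][0].upper()  (both programs evaluate it only under len(n.split()) >= 2, where it is total)
def pvInitialUpper (n : String) : String :=
  match PySem.List.pyGet? ((PySem.List.pyGet? (PySem.Str.split₀ n) 0).getD "").toList 0 with
  | some c => PySem.Str.upper (String.ofList [c])
  | none => ""

-- ===== PORT A =====
-- step 3 of A: scan the whole dict for matching last names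
def pvStep3A (name : String) (name_to_id : List (String × Int)) : Option Int :=
  if ((name_to_id.filter (fun p => pvLastLower p.1 == pvLastLower name)).map (·.2)).length == 1
  then PySem.List.pyGet? ((name_to_id.filter (fun p => pvLastLower p.1 == pvLastLower name)).map (·.2)) 0
  else none

-- step 2 of A: scan the whole dict; `none` means fall through (Python's step 2 never returns None)
def pvStep2A (name : String) (name_to_id : List (String × Int)) : Option Int :=
  if (pvParts name).length == 2 then
    (fun candidates =>
      if candidates.length == 1 then PySem.List.pyGet? candidates 0
      else if 1 < candidates.length then PySem.List.pyGet? candidates 0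
      else none)
    ((name_to_id.filter (fun p =>
        decide (2 ≤ (PySem.Str.split₀ p.1).length) &&
        (pvLastLower p.1 == PySem.Str.lower (PySem.Str.strip ((PySem.List.pyGet? (pvParts name) 1).getD ""))) &&
        (pvInitialUpper p.1 == PySem.Str.upper (PySem.Str.strip ((PySem.List.pyGet? (pvParts name) 0).getD ""))))).map (·.2))
  else none

def match_betfair_name_py (betfair_name : String) (name_to_id : List (String × Int)) : Option Int :=
  match name_to_id.find? (fun p => p.1 == PySem.Str.strip betfair_name) with
  | some p => some p.2
  | none =>
    match pvStep2A (PySem.Str.strip betfair_name) name_to_id with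
    | some r => some r
    | none => pvStep3A (PySem.Str.strip betfair_name) name_to_id

-- ===== PORT B =====
-- one grouping pass: lowercased last name ↦ its entries, in insertion order
def pvBuckets (name_to_id : List (String × Int)) : PySem.Dict String (List (String × Int)) :=
  name_to_id.foldl (fun d p =>
    if (PySem.Str.split₀ p.1).isEmpty then d
    else d.modify (pvLastLower p.1) [] (fun b => b ++ [p])) PySem.Dict.empty

def pvStep2B (buckets : PySem.Dict String (List (String × Int))) (name : String) : Option Int :=
  if (pvParts name).length == 2 then
    (((buckets.getD (PySem.Str.lower (PySem.Str.strip ((PySem.List.pyGet? (pvParts name) 1).getD ""))) []).filter (fun p =>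
        decide (2 ≤ (PySem.Str.split₀ p.1).length) &&
        (pvInitialUpper p.1 == PySem.Str.upper (PySem.Str.strip ((PySem.List.pyGet? (pvParts name) 0).getD ""))))).map (·.2)).head?
  else none

def pvStep3B (buckets : PySem.Dict String (List (String × Int))) (name : String) : Option Int :=
  if (buckets.getD (pvLastLower name) []).length == 1
  then (PySem.List.pyGet? (buckets.getD (pvLastLower name) []) 0).map (·.2)
  else none

def match_betfair_name_py_alt (betfair_name : String) (name_to_id : List (String × Int)) : Option Int :=
  match name_to_id.find? (fun p => p.1 == PySem.Str.strip betfair_name) with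
  | some p => some p.2
  | none =>
    match pvStep2B (pvBuckets name_to_id) (PySem.Str.strip betfair_name) with
    | some r => some r
    | none => pvStep3B (pvBuckets name_to_id) (PySem.Str.strip betfair_name)

-- ===== PRECONDITION & SPEC =====
-- Pre_ excludes: whitespace-only betfair_name and whitespace-only dict keys, on which A's
-- fallback raises IndexError at `split()[-1]` (A returns there only via an accidental earlier
-- match — see the cites); and lists with duplicate keys, which no Python dict input can
-- represent (the assoc-list model of a dict would be ambiguous there).
def Pre_match_betfair_name_py (betfair_name : String) (name_to_id : List (String × Int)) : Prop :=
  PySem.Str.split₀ (PySem.Str.strip betfair_name) ≠ [] ∧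
  (∀ p ∈ name_to_id, PySem.Str.split₀ p.1 ≠ []) ∧
  (name_to_id.map Prod.fst).Nodup

instance (betfair_name : String) (name_to_id : List (String × Int)) : Decidable (Pre_match_betfair_name_py betfair_name name_to_id) := by unfold Pre_match_betfair_name_py; infer_instance

def pvWitness_match_betfair_name_py : String × (List (String × Int)) :=
  ("N. Djokovic", [("Novak Djokovic", 1), ("Rafael Nadal", 2)])

def Spec_match_betfair_name_py (betfair_name : String) (name_to_id : List (String × Int)) (out : Option Int) : Prop := out = match_betfair_name_py_alt betfair_name name_to_id
instance (betfair_name : String) (name_to_id : List (String × Int)) (out : Option Int) : Decidable (Spec_match_betfair_name_py betfair_name name_to_id out) := by unfold Spec_match_betfair_name_py; infer_instance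

-- ===== CLAIM (what is proved, stated in full; the proofs are below) =====
def Claim_equal_match_betfair_name_py : Prop := ∀ (betfair_name : String) (name_to_id : List (String × Int)), Dom_match_betfair_name_py betfair_name name_to_id → Pre_match_betfair_name_py betfair_name name_to_id → Spec_match_betfair_name_py betfair_name name_to_id (match_betfair_name_py betfair_name name_to_id)

-- ===== LEMMAS AND PROOFS =====

-- the bucket at L is exactly A's whole-dict filter by lowercased last name
theorem pvBuckets_getD (l : List (String × Int)) (h : ∀ p ∈ l, PySem.Str.split₀ p.1 ≠ []) (L : String) :
    (pvBuckets l).getD L [] = l.filter (fun p => pvLastLower p.1 == L) := by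
  unfold pvBuckets
  have hstep : ∀ (d : PySem.Dict String (List (String × Int))) (p : String × Int), p ∈ l →
      (if (PySem.Str.split₀ p.1).isEmpty then d else d.modify (pvLastLower p.1) [] (fun b => b ++ [p]))
      = d.modify (pvLastLower p.1) [] (fun b => b ++ [p]) := by
    intro d p hp
    simp [List.isEmpty_iff, h p hp]
  rw [PySem.List.foldl_congr_mem _ _ _ _ hstep]
  rw [← List.foldl_map (f := fun p : String × Int => (pvLastLower p.1, p))
      (g := fun d (q : String × (String × Int)) => PySem.Dict.modify d q.1 [] (fun b => b ++ [q.2]))]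
  rw [PySem.Dict.getD_foldl_modify_append]
  simp [List.filter_map, List.map_map, Function.comp_def]

theorem pvStep2_eq (name : String) (l : List (String × Int)) (h : ∀ p ∈ l, PySem.Str.split₀ p.1 ≠ []) :
    pvStep2B (pvBuckets l) name = pvStep2A name l := by
  unfold pvStep2A pvStep2B
  split
  · rw [pvBuckets_getD l h, List.filter_filter]
    have hPQ : l.filter (fun p =>
          (decide (2 ≤ (PySem.Str.split₀ p.1).length) &&
            (pvInitialUpper p.1 == PySem.Str.upper (PySem.Str.strip ((PySem.List.pyGet? (pvParts name) 0).getD "")))) &&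
          (pvLastLower p.1 == PySem.Str.lower (PySem.Str.strip ((PySem.List.pyGet? (pvParts name) 1).getD ""))))
        = l.filter (fun p =>
          decide (2 ≤ (PySem.Str.split₀ p.1).length) &&
          (pvLastLower p.1 == PySem.Str.lower (PySem.Str.strip ((PySem.List.pyGet? (pvParts name) 1).getD ""))) &&
          (pvInitialUpper p.1 == PySem.Str.upper (PySem.Str.strip ((PySem.List.pyGet? (pvParts name) 0).getD "")))) := by
      refine List.filter_congr ?_
      intro p _
      generalize decide (2 ≤ (PySem.Str.split₀ p.1).length) = a
      generalize (pvLastLower p.1 == _) = b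
      generalize (pvInitialUpper p.1 == _) = c
      cases a <;> cases b <;> cases c <;> rfl
    rw [hPQ]
    generalize l.filter _ = ps
    cases ps with
    | nil => rfl
    | cons x t => cases t <;> simp [PySem.List.pyGet?_zero_cons]
  · rfl

theorem pvStep3_eq (name : String) (l : List (String × Int)) (h : ∀ p ∈ l, PySem.Str.split₀ p.1 ≠ []) :
    pvStep3B (pvBuckets l) name = pvStep3A name l := by
  unfold pvStep3A pvStep3B
  rw [pvBuckets_getD l h]
  generalize l.filter _ = ps
  cases ps with
  | nil => rfl
  | cons x t => cases t <;> simp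

-- ===== VERDICT (by name: the statement is the Claim_ definition above) =====
theorem match_betfair_name_py_spec : Claim_equal_match_betfair_name_py := by
  intro betfair_name name_to_id _hdom hpre
  obtain ⟨-, h2, -⟩ := hpre
  unfold Spec_match_betfair_name_py match_betfair_name_py match_betfair_name_py_alt
  cases name_to_id.find? (fun p => p.1 == PySem.Str.strip betfair_name) with
  | some p => rfl
  | none =>
    rw [pvStep2_eq _ _ h2, pvStep3_eq _ _ h2]
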